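-- pv_equiv track=rewrite | github.com/wallaby150/TIL | Algorithm/다시 풀 거/20665_독서실 거리두기.py | calc_dist
-- ===== SOURCE A (Python) =====
-- def calc_dist(is_seated, h, m, i, N):
--     mid_dist = 101
--     for next_seat in range(1, N + 1):
--         if next_seat == i:
--             continue
--         if is_seated[h][m][next_seat]:
--             d = abs(i - next_seat)
--             if d < mid_dist:
--                 mid_dist = d
--
--     return mid_dist
-- ===== SOURCE B (Python) =====
-- def calc_dist(is_seated, h, m, i, N):
--     # outward expansion from seat i: first occupied distance, capped at 100
--     for d in range(1, 101):
--         left = i - d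
--         right = i + d
--         if 1 <= left <= N and is_seated[h][m][left]:
--             return d
--         if 1 <= right <= N and is_seated[h][m][right]:
--             return d
--     return 101
-- ===== Notes on version B (the rewrite author's own statement) =====
-- stated objective: alternative
-- what changed: Replaced A's full linear scan over all N seats with a running minimum by an outward expansion from seat i that returns the first occupied distance found and stops at distance 100 (matching A's 101 sentinel); at most 200 probes instead of N iterations, though a timing run could not measure this.
import Mathlib
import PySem

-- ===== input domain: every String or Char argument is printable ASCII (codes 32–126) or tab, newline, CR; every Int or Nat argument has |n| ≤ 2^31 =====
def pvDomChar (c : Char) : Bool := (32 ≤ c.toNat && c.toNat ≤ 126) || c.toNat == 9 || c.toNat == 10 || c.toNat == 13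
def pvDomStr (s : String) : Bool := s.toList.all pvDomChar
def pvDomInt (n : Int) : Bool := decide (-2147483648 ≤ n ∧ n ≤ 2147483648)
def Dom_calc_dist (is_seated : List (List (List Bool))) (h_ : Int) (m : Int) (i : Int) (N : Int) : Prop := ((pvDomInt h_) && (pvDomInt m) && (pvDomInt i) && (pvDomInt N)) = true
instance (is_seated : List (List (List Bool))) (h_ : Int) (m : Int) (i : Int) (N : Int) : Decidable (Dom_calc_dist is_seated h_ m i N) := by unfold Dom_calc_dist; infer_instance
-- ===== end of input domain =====

-- B replaces A's full scan over all N seats with an outward expansion from seat i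
-- that returns the first occupied distance (capped at 100); at most 200 probes instead of N iterations.

-- ===== PORT A =====
def calc_dist (is_seated : List (List (List Bool))) (h_ : Int) (m : Int) (i : Int) (N : Int) : Int :=
  (PySem.List.pyRange 1 (N + 1) 1).foldl
    (fun mid_dist next_seat =>
      if next_seat = i then mid_dist
      else if ((((PySem.List.pyGet? is_seated h_).bind fun r => PySem.List.pyGet? r m).bind
                  fun row => PySem.List.pyGet? row next_seat).getD false) then
        (if |i - next_seat| < mid_dist then |i - next_seat| else mid_dist)
      else mid_dist) 101

-- ===== PORT B =====
-- is_seated[h][m][k] as B reads it (none/invalid never consulted inside Pre_)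
def pvSeat (is_seated : List (List (List Bool))) (h_ : Int) (m : Int) (k : Int) : Bool :=
  ((((PySem.List.pyGet? is_seated h_).bind fun r => PySem.List.pyGet? r m).bind
      fun row => PySem.List.pyGet? row k).getD false)

def pvLoopB (is_seated : List (List (List Bool))) (h_ : Int) (m : Int) (i : Int) (N : Int) : List Int → Int
  | [] => 101
  | d :: ds =>
    if 1 ≤ i - d ∧ i - d ≤ N ∧ pvSeat is_seated h_ m (i - d) = true then d
    else if 1 ≤ i + d ∧ i + d ≤ N ∧ pvSeat is_seated h_ m (i + d) = true then d
    else pvLoopB is_seated h_ m i N ds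

def calc_dist_alt (is_seated : List (List (List Bool))) (h_ : Int) (m : Int) (i : Int) (N : Int) : Int :=
  pvLoopB is_seated h_ m i N (PySem.List.pyRange 1 101 1)

-- ===== PRECONDITION & SPEC =====
-- Pre_ holds exactly when Python A returns (no IndexError): whenever the loop actually
-- indexes the seat row (some seat 1..N other than i exists), is_seated[h][m] must exist
-- (Python negative-index rule, via pyGet?) and every index A touches must be in range.
def Pre_calc_dist (is_seated : List (List (List Bool))) (h_ : Int) (m : Int) (i : Int) (N : Int) : Prop :=
  (1 ≤ N ∧ (2 ≤ N ∨ i ≠ 1)) →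
    (((PySem.List.pyGet? is_seated h_).bind fun r => PySem.List.pyGet? r m).any
      fun row => decide ((if i = N then N - 1 else N) < (row.length : Int))) = true
instance (is_seated : List (List (List Bool))) (h_ : Int) (m : Int) (i : Int) (N : Int) : Decidable (Pre_calc_dist is_seated h_ m i N) := by unfold Pre_calc_dist; infer_instance

def pvWitness_calc_dist : List (List (List Bool)) × Int × Int × Int × Int :=
  ([[[false, true, true]]], 0, 0, 1, 2)

def Spec_calc_dist (is_seated : List (List (List Bool))) (h_ : Int) (m : Int) (i : Int) (N : Int) (out : Int) : Prop := out = calc_dist_alt is_seated h_ m i N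
instance (is_seated : List (List (List Bool))) (h_ : Int) (m : Int) (i : Int) (N : Int) (out : Int) : Decidable (Spec_calc_dist is_seated h_ m i N out) := by unfold Spec_calc_dist; infer_instance

-- ===== CLAIM (what is proved, stated in full; the proofs are below) =====
def Claim_equal_calc_dist : Prop := ∀ (is_seated : List (List (List Bool))) (h_ : Int) (m : Int) (i : Int) (N : Int), Dom_calc_dist is_seated h_ m i N → Pre_calc_dist is_seated h_ m i N → Spec_calc_dist is_seated h_ m i N (calc_dist is_seated h_ m i N)

-- ===== LEMMAS AND PROOFS =====

-- characterization of A's running-min fold, for an arbitrary occupancy predicate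
theorem pv_foldA_spec (occf : Int → Bool) (i : Int) :
    ∀ (L : List Int) (a : Int),
      (L.foldl (fun md k => if k = i then md
          else if occf k then (if |i - k| < md then |i - k| else md) else md) a) ≤ a ∧
      (∀ k ∈ L, k ≠ i → occf k = true →
        (L.foldl (fun md k => if k = i then md
          else if occf k then (if |i - k| < md then |i - k| else md) else md) a) ≤ |i - k|) ∧
      ((L.foldl (fun md k => if k = i then md
          else if occf k then (if |i - k| < md then |i - k| else md) else md) a) = a ∨
        ∃ k ∈ L, k ≠ i ∧ occf k = true ∧
          (L.foldl (fun md k => if k = i then md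
            else if occf k then (if |i - k| < md then |i - k| else md) else md) a) = |i - k|) := by
  intro L
  induction L with
  | nil => intro a; simp
  | cons k L ih =>
    intro a
    simp only [List.foldl_cons]
    obtain ⟨h1, h2, h3⟩ := ih (if k = i then a else if occf k then (if |i - k| < a then |i - k| else a) else a)
    have hstep : (if k = i then a else if occf k then (if |i - k| < a then |i - k| else a) else a) ≤ a := by
      split_ifs <;> omega
    refine ⟨h1.trans hstep, ?_, ?_⟩
    · intro k' hk' hne hocc
      rcases List.mem_cons.mp hk' with rfl | hmem
      · refine h1.trans ?_
        simp only [if_neg hne, hocc, if_true]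
        split_ifs <;> omega
      · exact h2 k' hmem hne hocc
    · rcases h3 with heq | ⟨k', hmem, hne, hocc, heq⟩
      · by_cases hki : k = i
        · left; rw [heq, if_pos hki]
        · by_cases hocc : occf k
          · by_cases hlt : |i - k| < a
            · right
              exact ⟨k, List.mem_cons_self, hki, hocc, by rw [heq, if_neg hki, if_pos hocc, if_pos hlt]⟩
            · left; rw [heq, if_neg hki, if_pos hocc, if_neg hlt]
          · left; rw [heq, if_neg hki, if_neg (by simpa using hocc)]
      · right; exact ⟨k', List.mem_cons_of_mem _ hmem, hne, hocc, heq⟩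

-- the condition B tests at distance d
def pvHit (is_seated : List (List (List Bool))) (h_ : Int) (m : Int) (i : Int) (N : Int) (d : Int) : Prop :=
  (1 ≤ i - d ∧ i - d ≤ N ∧ pvSeat is_seated h_ m (i - d) = true) ∨
  (1 ≤ i + d ∧ i + d ≤ N ∧ pvSeat is_seated h_ m (i + d) = true)

-- characterization of B's early-exit loop over a strictly increasing list
theorem pv_loopB_spec (s : List (List (List Bool))) (h_ m i N : Int) :
    ∀ (ds : List Int), ds.Pairwise (· < ·) →
      (pvLoopB s h_ m i N ds = 101 ∧ ∀ d ∈ ds, ¬ pvHit s h_ m i N d) ∨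
      (pvLoopB s h_ m i N ds ∈ ds ∧ pvHit s h_ m i N (pvLoopB s h_ m i N ds) ∧
        ∀ d ∈ ds, pvHit s h_ m i N d → pvLoopB s h_ m i N ds ≤ d) := by
  intro ds
  induction ds with
  | nil => intro _; left; simp [pvLoopB]
  | cons d ds ih =>
    intro hp
    have hlt := (List.pairwise_cons.mp hp).1
    have hp' := (List.pairwise_cons.mp hp).2
    by_cases hd : pvHit s h_ m i N d
    · have heq : pvLoopB s h_ m i N (d :: ds) = d := by
        rcases hd with h | h
        · simp only [pvLoopB]; rw [if_pos h]
        · by_cases hL : 1 ≤ i - d ∧ i - d ≤ N ∧ pvSeat s h_ m (i - d) = true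
          · simp only [pvLoopB]; rw [if_pos hL]
          · simp only [pvLoopB]; rw [if_neg hL, if_pos h]
      right
      rw [heq]
      refine ⟨List.mem_cons_self, hd, ?_⟩
      intro e he _
      rcases List.mem_cons.mp he with rfl | hm
      · exact le_refl e
      · exact le_of_lt (hlt e hm)
    · have heq : pvLoopB s h_ m i N (d :: ds) = pvLoopB s h_ m i N ds := by
        have h1 : ¬ (1 ≤ i - d ∧ i - d ≤ N ∧ pvSeat s h_ m (i - d) = true) := fun h => hd (Or.inl h)
        have h2 : ¬ (1 ≤ i + d ∧ i + d ≤ N ∧ pvSeat s h_ m (i + d) = true) := fun h => hd (Or.inr h)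
        simp only [pvLoopB]; rw [if_neg h1, if_neg h2]
      rcases ih hp' with ⟨h101, hno⟩ | ⟨hmem, hhit, hmin⟩
      · left
        refine ⟨heq.trans h101, ?_⟩
        intro e he
        rcases List.mem_cons.mp he with rfl | hm
        · exact hd
        · exact hno e hm
      · right
        rw [heq]
        refine ⟨List.mem_cons_of_mem _ hmem, hhit, ?_⟩
        intro e he hhe
        rcases List.mem_cons.mp he with rfl | hm
        · exact absurd hhe hd
        · exact hmin e hm hhe

-- ===== VERDICT (by name: the statement is the Claim_ definition above) =====
theorem calc_dist_spec : Claim_equal_calc_dist := by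
  intro is_seated h_ m i N _ _
  obtain ⟨hA1, hA2, hA3⟩ :=
    pv_foldA_spec (pvSeat is_seated h_ m) i (PySem.List.pyRange 1 (N + 1) 1) 101
  have hsort : (PySem.List.pyRange 1 101 1).Pairwise (· < ·) := PySem.List.pairwise_lt_pyRange_one 1 101
  have hmemL : ∀ k : Int, k ∈ PySem.List.pyRange 1 (N + 1) 1 ↔ 1 ≤ k ∧ k ≤ N := by
    intro k; rw [PySem.List.mem_pyRange_one]; omega
  have hmemD : ∀ d : Int, d ∈ PySem.List.pyRange 1 101 1 ↔ 1 ≤ d ∧ d ≤ 100 := by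
    intro d; rw [PySem.List.mem_pyRange_one]; omega
  -- a hit at distance |i - k| from an occupied in-range seat k ≠ i
  have mk_hit : ∀ k : Int, 1 ≤ k → k ≤ N → k ≠ i → pvSeat is_seated h_ m k = true →
      pvHit is_seated h_ m i N (|i - k|) := by
    intro k h1 h2 hne hocc
    rcases abs_cases (i - k) with ⟨hD, _⟩ | ⟨hD, _⟩
    · refine Or.inl ⟨by omega, by omega, ?_⟩
      have hk : i - |i - k| = k := by omega
      rw [hk]; exact hocc
    · refine Or.inr ⟨by omega, by omega, ?_⟩
      have hk : i + |i - k| = k := by omega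
      rw [hk]; exact hocc
  show calc_dist is_seated h_ m i N = calc_dist_alt is_seated h_ m i N
  have hBdef : calc_dist_alt is_seated h_ m i N
      = pvLoopB is_seated h_ m i N (PySem.List.pyRange 1 101 1) := rfl
  rw [hBdef]
  have hAdef : calc_dist is_seated h_ m i N
      = (PySem.List.pyRange 1 (N + 1) 1).foldl
          (fun md k => if k = i then md
            else if pvSeat is_seated h_ m k then (if |i - k| < md then |i - k| else md) else md) 101 := rfl
  rw [hAdef]
  rcases pv_loopB_spec is_seated h_ m i N (PySem.List.pyRange 1 101 1) hsort with
    ⟨hB101, hBno⟩ | ⟨hBmem, hBhit, hBmin⟩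
  · -- no hit within distance 100: A's minimum must be ≥ 101, so both return 101
    rw [hB101]
    rcases hA3 with h | ⟨k, hkmem, hne, hocc, heq⟩
    · exact h
    · obtain ⟨hk1, hk2⟩ := (hmemL k).mp hkmem
      have hnn : (0:Int) ≤ |i - k| := abs_nonneg _
      have hd1 : 1 ≤ |i - k| := by rcases abs_cases (i - k) with ⟨hD, _⟩ | ⟨hD, _⟩ <;> omega
      by_cases hle : |i - k| ≤ 100
      · exact absurd (mk_hit k hk1 hk2 hne hocc)
          (hBno _ ((hmemD _).mpr ⟨hd1, hle⟩))
      · omega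
  · -- B found the nearest occupied distance rB ≤ 100; A's minimum equals it
    obtain ⟨hB1, hB2⟩ := (hmemD _).mp hBmem
    -- rA ≤ rB: the hit at rB exhibits an occupied seat at distance rB
    have hArB : (PySem.List.pyRange 1 (N + 1) 1).foldl
          (fun md k => if k = i then md
            else if pvSeat is_seated h_ m k then (if |i - k| < md then |i - k| else md) else md) 101
        ≤ pvLoopB is_seated h_ m i N (PySem.List.pyRange 1 101 1) := by
      rcases hBhit with ⟨ha, hb, hc⟩ | ⟨ha, hb, hc⟩
      · have h' := hA2 _ ((hmemL _).mpr ⟨ha, hb⟩) (by omega) hc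
        have habs : |i - (i - pvLoopB is_seated h_ m i N (PySem.List.pyRange 1 101 1))|
            = pvLoopB is_seated h_ m i N (PySem.List.pyRange 1 101 1) := by
          have he : i - (i - pvLoopB is_seated h_ m i N (PySem.List.pyRange 1 101 1))
              = pvLoopB is_seated h_ m i N (PySem.List.pyRange 1 101 1) := by ring
          rw [he, abs_of_nonneg (by omega)]
        rw [habs] at h'
        exact h'
      · have h' := hA2 _ ((hmemL _).mpr ⟨ha, hb⟩) (by omega) hc
        have habs : |i - (i + pvLoopB is_seated h_ m i N (PySem.List.pyRange 1 101 1))|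
            = pvLoopB is_seated h_ m i N (PySem.List.pyRange 1 101 1) := by
          have he : i - (i + pvLoopB is_seated h_ m i N (PySem.List.pyRange 1 101 1))
              = -(pvLoopB is_seated h_ m i N (PySem.List.pyRange 1 101 1)) := by ring
          rw [he, abs_neg, abs_of_nonneg (by omega)]
        rw [habs] at h'
        exact h'
    -- rB ≤ rA: A's minimum comes from some occupied seat, which is a hit at distance rA
    rcases hA3 with h | ⟨k, hkmem, hne, hocc, heq⟩
    · omega
    · obtain ⟨hk1, hk2⟩ := (hmemL k).mp hkmem
      have hnn : (0:Int) ≤ |i - k| := abs_nonneg _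
      have hd1 : 1 ≤ |i - k| := by rcases abs_cases (i - k) with ⟨hD, _⟩ | ⟨hD, _⟩ <;> omega
      have hle : |i - k| ≤ 100 := by omega
      have h' := hBmin (|i - k|) ((hmemD _).mpr ⟨hd1, hle⟩) (mk_hit k hk1 hk2 hne hocc)
      omega
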